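-- pv_equiv track=rewrite | github.com/dev-jlpt18/GLC-Interpreter | gcl.py | get_union
-- ===== SOURCE A (Python) =====
-- def get_union(pila):
--     union = ""
--     range = len(pila)-1
--     if (range != 0):
--         union += "c_{24}"
--         item = pila.pop()
--         union += "(" + item + ")"
--         union += "("+get_union(pila)+")"
--         return union
--     else:
--         item = pila.pop()
--         union += item
--         return union
-- ===== SOURCE B (Python) =====
-- def get_union(pila):
--     # Iterative: pop all but the innermost element into a buffer, then
--     # wrap the base string with the buffered items in reverse pop order.
--     # Mutates pila (pops it empty) exactly like the recursive original.
--     buf = []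
--     while len(pila) - 1 != 0:
--         buf.append(pila.pop())
--     result = pila.pop()
--     for item in reversed(buf):
--         result = "c_{24}(" + item + ")(" + result + ")"
--     return result
-- ===== Notes on version B (the rewrite author's own statement) =====
-- stated objective: alternative
-- what changed: Replaces the recursion with an explicit loop: pop the wrappers into a buffer, then fold the nested c_{24}(...)(...) glue over the buffer in reverse pop order; Pre_ excludes the empty list, on which both programs raise IndexError.
import Mathlib
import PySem

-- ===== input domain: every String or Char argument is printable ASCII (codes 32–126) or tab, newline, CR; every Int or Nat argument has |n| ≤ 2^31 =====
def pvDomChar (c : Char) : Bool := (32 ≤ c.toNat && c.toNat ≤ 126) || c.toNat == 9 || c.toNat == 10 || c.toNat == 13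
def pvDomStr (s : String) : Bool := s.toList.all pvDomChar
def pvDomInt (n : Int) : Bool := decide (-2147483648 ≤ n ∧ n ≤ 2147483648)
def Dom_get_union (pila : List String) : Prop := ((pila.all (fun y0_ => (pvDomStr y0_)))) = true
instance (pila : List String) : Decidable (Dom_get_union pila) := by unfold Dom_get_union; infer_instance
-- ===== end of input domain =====

-- B changes the decomposition only (recursive → iterative fold); equivalence is about the
-- RETURN value: both Pythons pop `pila` empty in place, a side effect not modelled here.

-- ===== PORT A =====
-- A pops the last element (pila.pop()) and recurses on the rest; on [] Python raises
-- IndexError, which Pre_ excludes (the port returns "" there, a value never claimed).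
def get_union (pila : List String) : String :=
  match h : pila.getLast? with
  | none => ""  -- pila.pop() raises IndexError here; outside Pre_
  | some item =>
    if pila.length - 1 ≠ 0 then
      "c_{24}" ++ ("(" ++ item ++ ")") ++ ("(" ++ get_union pila.dropLast ++ ")")
    else
      item
termination_by pila.length
decreasing_by
  have : pila ≠ [] := by intro hn; simp [hn] at h
  simpa [List.length_dropLast] using Nat.sub_lt (List.length_pos_iff.mpr this) one_pos

-- ===== PORT B =====
-- B: the while-loop pops rest into buf (so buf = rest.reverse), the final pop yields the
-- head as base, then the for-loop folds the wrapper over reversed(buf).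
def get_union_alt (pila : List String) : String :=
  match pila with
  | [] => ""  -- the loop's pila.pop() raises IndexError here; outside Pre_
  | base :: rest =>
    let buf := rest.reverse
    buf.reverse.foldl (fun result item => "c_{24}(" ++ item ++ ")(" ++ result ++ ")") base

-- ===== PRECONDITION & SPEC =====
-- Pre_ excludes only the empty list, on which A (and B) raise IndexError.
def Pre_get_union (pila : List String) : Prop := pila ≠ []
instance (pila : List String) : Decidable (Pre_get_union pila) := by unfold Pre_get_union; infer_instance
def pvWitness_get_union : List String := (["a", "b"])

def Spec_get_union (pila : List String) (out : String) : Prop := out = get_union_alt pila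
instance (pila : List String) (out : String) : Decidable (Spec_get_union pila out) := by unfold Spec_get_union; infer_instance

-- ===== CLAIM (what is proved, stated in full; the proofs are below) =====
def Claim_equal_get_union : Prop := ∀ (pila : List String), Dom_get_union pila → Pre_get_union pila → Spec_get_union pila (get_union pila)

-- ===== LEMMAS AND PROOFS =====
theorem wrap_eq (s t : String) :
    "c_{24}" ++ ("(" ++ s ++ ")") ++ ("(" ++ t ++ ")") = "c_{24}(" ++ s ++ ")(" ++ t ++ ")" := by
  simp [← String.append_assoc]
  rw [String.append_assoc]
  rfl

theorem get_union_cons (base : String) (rest : List String) :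
    get_union (base :: rest) =
      rest.foldl (fun result item => "c_{24}(" ++ item ++ ")(" ++ result ++ ")") base := by
  induction rest using List.reverseRecOn with
  | nil => simp [get_union]
  | append_singleton ys y ih =>
    have heq : base :: (ys ++ [y]) = (base :: ys) ++ [y] := by simp
    rw [heq, get_union]
    split
    · rename_i h
      simp at h
    · rename_i item h
      rw [List.getLast?_concat] at h
      injection h with h
      subst h
      rw [if_pos (by simp), List.dropLast_concat, ih, List.foldl_append]
      simp [wrap_eq]

-- ===== VERDICT (by name: the statement is the Claim_ definition above) =====
theorem get_union_spec : Claim_equal_get_union := by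
  intro pila _ hpre
  match pila with
  | [] => exact absurd rfl hpre
  | base :: rest =>
    show get_union (base :: rest) = get_union_alt (base :: rest)
    rw [get_union_cons]
    simp [get_union_alt]
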